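-- pv_equiv track=rewrite | github.com/chimd715/AlgorithmStudy | Programmers/level1/keypad.py | measure_distance
-- ===== SOURCE A (Python) =====
-- from collections import deque
--
-- def measure_distance(origin_position, target_position):
--     def get_int_node(node):
--         if node == '*':
--             return 10
--         elif node == '#':
--             return 11
--         return int(node)
--
--     nodes = ['1', '2', '3', '4', '5', '6', '7', '8', '9', '0', '*', '#']
--     edges = {
--         '1': ['2', '4'],
--         '2': ['1', '3', '5'],
--         '3': ['2', '6'],
--         '4': ['1', '5', '7'],
--         '5': ['2', '4', '6', '8'],
--         '6': ['3', '5', '9'],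
--         '7': ['4', '8', '*'],
--         '8': ['5', '7', '9', '0'],
--         '9': ['6', '8', '#'],
--         '0': ['*', '#', '8'],
--         '*': ['7', '0'],
--         '#': ['0', '9']
--     }
--
--     to_visit_nodes = deque()
--     to_visit_nodes.append(origin_position)
--
--     visited_nodes = []
--     distances = [0] * 12
--     while to_visit_nodes:
--         current_node = to_visit_nodes.popleft()
--         visited_nodes.append(current_node)
--         for edge in edges[current_node]:
--             if edge in visited_nodes:
--                 continue
--
--             edge_pos = get_int_node(edge)
--             current_node_pos = get_int_node(current_node)
--             if distances[edge_pos] == 0: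
--                 distances[edge_pos] = distances[current_node_pos] + 1
--             else:
--                 distances[edge_pos] = min(distances[edge_pos], distances[current_node_pos] + 1)
--
--             to_visit_nodes.append(edge)
--     return distances[get_int_node(target_position)]
-- ===== SOURCE B (Python) =====
-- def measure_distance(origin_position, target_position):
--     coords = {'1': (0, 0), '2': (0, 1), '3': (0, 2),
--               '4': (1, 0), '5': (1, 1), '6': (1, 2),
--               '7': (2, 0), '8': (2, 1), '9': (2, 2),
--               '*': (3, 0), '0': (3, 1), '#': (3, 2)}
--     r0, c0 = coords[origin_position]
--     r1, c1 = coords[target_position]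
--     return abs(r0 - r1) + abs(c0 - c1)
-- ===== Notes on version B (the rewrite author's own statement) =====
-- stated objective: simpler
-- what changed: Replaces the deque-based BFS over the keypad adjacency graph by a fixed (row,col) coordinate table and a closed-form Manhattan-distance formula, eliminating the queue, visited list and distance array entirely.
-- outside the precondition, e.g. on measure_distance('5', '10'): A returns 3, B raises KeyError; on measure_distance('5', ' 7 '): A returns 2, B raises KeyError; on measure_distance('5', '-3'): A returns 2, B raises KeyError
import Mathlib
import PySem

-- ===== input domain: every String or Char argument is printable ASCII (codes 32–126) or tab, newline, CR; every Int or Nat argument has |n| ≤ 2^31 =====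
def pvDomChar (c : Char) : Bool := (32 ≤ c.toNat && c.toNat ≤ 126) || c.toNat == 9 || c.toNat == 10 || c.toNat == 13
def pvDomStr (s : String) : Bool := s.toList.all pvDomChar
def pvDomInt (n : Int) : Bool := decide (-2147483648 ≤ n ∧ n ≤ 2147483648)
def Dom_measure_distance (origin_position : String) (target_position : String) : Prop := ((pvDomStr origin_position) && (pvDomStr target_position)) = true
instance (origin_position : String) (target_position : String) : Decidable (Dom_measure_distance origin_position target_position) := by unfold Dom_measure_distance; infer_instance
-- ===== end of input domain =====

-- B replaces A's deque BFS over the keypad graph by a coordinate table and a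
-- closed-form Manhattan distance (objective: simpler).

-- ===== PORT A =====
-- get_int_node: '*'→10, '#'→11, else int(node).  int(node) raises ValueError on
-- non-int-like strings (outside Pre_); the .getD 0 default is never reached inside Pre_.
def pvGetIntNode (node : String) : Int :=
  if node = "*" then 10
  else if node = "#" then 11
  else (PySem.Int.ofStr? node).getD 0

def pvEdges : PySem.Dict String (List String) := PySem.Dict.ofList
  [("1", ["2", "4"]), ("2", ["1", "3", "5"]), ("3", ["2", "6"]),
   ("4", ["1", "5", "7"]), ("5", ["2", "4", "6", "8"]), ("6", ["3", "5", "9"]),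
   ("7", ["4", "8", "*"]), ("8", ["5", "7", "9", "0"]), ("9", ["6", "8", "#"]),
   ("0", ["*", "#", "8"]), ("*", ["7", "0"]), ("#", ["0", "9"])]

-- the unused `nodes` list of A (kept: it is also Pre_'s key list)
def pvNodes : List String := ["1", "2", "3", "4", "5", "6", "7", "8", "9", "0", "*", "#"]

-- the while loop; fuel only makes the recursion total (the queue empties after
-- at most 34 pops for any keypad origin, and immediately for any other origin,
-- since edges.getD then yields []).  Indices from pvGetIntNode are 0..11 for all
-- strings taken from pvEdges, so List.set/getD with .toNat mirrors Python exactly here.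
def pvBfsLoop : Nat → List String → List String → List Int → List Int
  | 0, _, _, dist => dist
  | _ + 1, [], _, dist => dist
  | fuel + 1, current :: queue, visited, dist =>
      let visited := visited ++ [current]
      let s := (pvEdges.getD current []).foldl
        (fun (s : List Int × List String) edge =>
          if visited.contains edge then s
          else
            let ep := (pvGetIntNode edge).toNat
            let cp := (pvGetIntNode current).toNat
            let de := s.1.getD ep 0
            let dc := s.1.getD cp 0
            let d' := if de = 0 then s.1.set ep (dc + 1) else s.1.set ep (min de (dc + 1))
            (d', s.2 ++ [edge]))
        (dist, queue)
      pvBfsLoop fuel s.2 visited s.1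

def measure_distance (origin_position : String) (target_position : String) : Int :=
  let dist := pvBfsLoop 100 [origin_position] [] (List.replicate 12 (0 : Int))
  -- distances[get_int_node(target)]: pyGet? handles Python's negative indexing;
  -- .getD 0 covers only the IndexError case, which lies outside Pre_
  (PySem.List.pyGet? dist (pvGetIntNode target_position)).getD 0

-- ===== PORT B =====
def pvCoords : PySem.Dict String (Int × Int) := PySem.Dict.ofList
  [("1", (0, 0)), ("2", (0, 1)), ("3", (0, 2)),
   ("4", (1, 0)), ("5", (1, 1)), ("6", (1, 2)),
   ("7", (2, 0)), ("8", (2, 1)), ("9", (2, 2)),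
   ("*", (3, 0)), ("0", (3, 1)), ("#", (3, 2))]

def measure_distance_alt (origin_position : String) (target_position : String) : Int :=
  -- coords[origin], coords[target]: KeyError on unknown keys lies outside Pre_
  match pvCoords.get? origin_position, pvCoords.get? target_position with
  | some (r0, c0), some (r1, c1) => |r0 - r1| + |c0 - c1|
  | _, _ => 0

-- ===== PRECONDITION & SPEC =====
-- Pre_ excludes inputs on which Python A raises (KeyError on a non-key origin,
-- ValueError on a non-int-like target, IndexError on an out-of-range int target)
-- and, additionally, non-key int-like targets such as '10', ' 7 ' or '-3' on which
-- A returns an accidental value via int() coercion and list indexing (with negative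
-- wraparound); B naturally raises KeyError there.
def Pre_measure_distance (origin_position : String) (target_position : String) : Prop :=
  origin_position ∈ pvNodes ∧ target_position ∈ pvNodes
instance (origin_position : String) (target_position : String) : Decidable (Pre_measure_distance origin_position target_position) := by unfold Pre_measure_distance; infer_instance

def pvWitness_measure_distance : String × String := ("1", "#")

def Spec_measure_distance (origin_position : String) (target_position : String) (out : Int) : Prop := out = measure_distance_alt origin_position target_position
instance (origin_position : String) (target_position : String) (out : Int) : Decidable (Spec_measure_distance origin_position target_position out) := by unfold Spec_measure_distance; infer_instance

-- ===== CLAIM (what is proved, stated in full; the proofs are below) =====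
def Claim_equal_measure_distance : Prop := ∀ (origin_position : String) (target_position : String), Dom_measure_distance origin_position target_position → Pre_measure_distance origin_position target_position → Spec_measure_distance origin_position target_position (measure_distance origin_position target_position)

-- ===== LEMMAS AND PROOFS =====
-- A = B on all 144 keypad key pairs, checked by evaluation
set_option maxRecDepth 8000 in
theorem pv_all144 :
    (pvNodes.all fun o => pvNodes.all fun t =>
      measure_distance o t == measure_distance_alt o t) = true := by decide

-- ===== VERDICT (by name: the statement is the Claim_ definition above) =====
theorem measure_distance_spec : Claim_equal_measure_distance := by
  intro o t _ hp
  obtain ⟨ho, ht⟩ := hp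
  have h := pv_all144
  simp only [List.all_eq_true, beq_iff_eq] at h
  exact h o ho t ht
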